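-- pv_equiv track=rewrite | github.com/Ermars8055/SHA1-e3firewall | firewall_project/securehash_project/storage/utils/sha1_sponge_collatz_enhanced.py | balance_byte
-- ===== SOURCE A (Python) =====
-- PRIMES = [0x29, 0x43, 0x5F, 0x71, 0x8D, 0xB3, 0xD1, 0xE9]
--
-- def balance_byte(byte: int, target_bits: int = 4) -> int:
--     """Gently balance bits by flipping one at a time, only for outliers."""
--     b = byte & 0xFF
--     bits = bin(b).count('1')
--
--     # Only balance extreme outliers
--     if bits <= 5 and bits >= 3:
--         return b
--
--     # Store original value in case we need to fall back
--     orig = b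
--     attempts = 0
--     max_attempts = 8
--
--     while bits > 5 and attempts < max_attempts:
--         # Find set bits
--         set_bits = [i for i in range(8) if b & (1 << i)]
--         if not set_bits:
--             break
--         # Use value-dependent selection instead of random
--         idx = ((b * PRIMES[attempts % len(PRIMES)]) + bits) % len(set_bits)
--         b &= ~(1 << set_bits[idx])
--         bits = bin(b).count('1')
--         attempts += 1
--
--     while bits < 3 and attempts < max_attempts:
--         # Find clear bits
--         clear_bits = [i for i in range(8) if not (b & (1 << i))]
--         if not clear_bits:
--             break
--         # Use different prime for variation
--         idx = ((b * PRIMES[(attempts + 3) % len(PRIMES)]) + bits) % len(clear_bits)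
--         b |= (1 << clear_bits[idx])
--         bits = bin(b).count('1')
--         attempts += 1
--
--     # If we failed to balance gently, use original value
--     final_bits = bin(b).count('1')
--     if final_bits > 5 or final_bits < 3:
--         return orig
--
--     return b
-- ===== SOURCE B (Python) =====
-- # Precomputed 256-entry output table: balance_byte depends only on byte & 0xFF
-- # (target_bits is accepted but unused), so the balancing logic collapses to one lookup.
-- BALANCED = [
--     137, 137, 26, 131, 76, 37, 22, 7, 28, 137, 74, 11, 28, 13, 14, 15,
--     28, 49, 26, 19, 21, 21, 22, 23, 28, 25, 26, 27, 28, 29, 30, 31,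
--     100, 161, 98, 35, 44, 37, 38, 39, 104, 41, 42, 43, 44, 45, 46, 47,
--     52, 49, 50, 51, 52, 53, 54, 55, 56, 57, 58, 59, 60, 61, 62, 55,
--     76, 81, 74, 67, 69, 69, 70, 71, 76, 73, 74, 75, 76, 77, 78, 79,
--     81, 81, 82, 83, 84, 85, 86, 87, 88, 89, 90, 91, 92, 93, 94, 93,
--     100, 97, 98, 99, 100, 101, 102, 103, 104, 105, 106, 107, 108, 109, 110, 103,
--     112, 113, 114, 115, 116, 117, 118, 117, 120, 121, 122, 107, 124, 121, 124, 55,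
--     140, 193, 162, 131, 140, 133, 134, 135, 168, 137, 138, 139, 140, 141, 142, 143,
--     148, 145, 146, 147, 148, 149, 150, 151, 152, 153, 154, 155, 156, 157, 158, 151,
--     176, 161, 162, 163, 164, 165, 166, 167, 168, 169, 170, 171, 172, 173, 174, 47,
--     176, 177, 178, 179, 180, 181, 182, 167, 184, 185, 186, 59, 188, 173, 182, 151,
--     196, 193, 194, 195, 196, 197, 198, 199, 200, 201, 202, 203, 204, 205, 206, 199,
--     208, 209, 210, 211, 212, 213, 214, 213, 216, 217, 218, 203, 220, 217, 220, 93,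
--     224, 225, 226, 227, 228, 229, 230, 199, 232, 233, 234, 107, 236, 205, 230, 103,
--     240, 241, 242, 211, 244, 241, 244, 167, 248, 217, 234, 217, 248, 61, 158, 103,
-- ]
--
-- def balance_byte(byte: int, target_bits: int = 4) -> int:
--     return BALANCED[byte & 0xFF]
-- ===== Notes on version B (the rewrite author's own statement) =====
-- stated objective: idiomatic
-- what changed: Replaced the two bit-flipping while-loops with a precomputed 256-entry output table indexed by byte & 0xFF (the function depends only on that value; target_bits is unused), making each call a single list lookup.
import Mathlib
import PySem

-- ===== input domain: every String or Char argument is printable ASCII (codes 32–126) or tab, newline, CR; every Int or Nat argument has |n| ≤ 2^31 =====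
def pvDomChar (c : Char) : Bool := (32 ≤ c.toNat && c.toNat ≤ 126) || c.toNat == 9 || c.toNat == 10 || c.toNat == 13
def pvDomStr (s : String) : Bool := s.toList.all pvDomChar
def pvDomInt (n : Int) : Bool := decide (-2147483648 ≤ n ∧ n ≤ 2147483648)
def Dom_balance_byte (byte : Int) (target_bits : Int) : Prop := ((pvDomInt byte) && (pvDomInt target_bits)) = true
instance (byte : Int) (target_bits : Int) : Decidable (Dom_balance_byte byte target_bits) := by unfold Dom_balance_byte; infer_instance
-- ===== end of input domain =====

-- B replaces A's two bit-flipping while-loops by a precomputed 256-entry output table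
-- indexed by byte & 0xFF (the function depends only on that value; target_bits is unused).

-- ===== PORT A =====

def PRIMES : List Int := [41, 67, 95, 113, 141, 179, 209, 233]

-- bin(b).count('1') for nonnegative b (all b reaching it lie in [0, 255]); fuel 16 covers that range.
def pvBitCountFuel : Nat → Nat → Nat
  | 0, _ => 0
  | f + 1, n => n % 2 + pvBitCountFuel f (n / 2)

def pvBits (b : Int) : Int := (pvBitCountFuel 16 b.toNat : Int)

-- first while-loop: while bits > 5 and attempts < 8; fuel 8 = max_attempts bounds its iterations exactly
def pvLoopHigh : Nat → Int → Int → Int → Int × Int × Int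
  | 0, b, bits, attempts => (b, bits, attempts)
  | f + 1, b, bits, attempts =>
    if bits > 5 ∧ attempts < 8 then
      let set_bits := (List.range 8).filter (fun i => decide (PySem.Int.band b (2 ^ i) ≠ 0))
      if set_bits = [] then (b, bits, attempts)
      else
        let prime := PySem.List.pyGetD PRIMES (PySem.Int.mod attempts 8) 0
        let idx := PySem.Int.mod (b * prime + bits) (set_bits.length : Int)
        let j := set_bits.getD idx.toNat 0         -- set_bits[idx], idx ∈ [0, len)
        let b' := PySem.Int.band b (-(2 ^ j : Int) - 1)   -- b &= ~(1 << j)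
        pvLoopHigh f b' (pvBits b') (attempts + 1)
    else (b, bits, attempts)

-- second while-loop: while bits < 3 and attempts < 8
def pvLoopLow : Nat → Int → Int → Int → Int × Int × Int
  | 0, b, bits, attempts => (b, bits, attempts)
  | f + 1, b, bits, attempts =>
    if bits < 3 ∧ attempts < 8 then
      let clear_bits := (List.range 8).filter (fun i => decide (PySem.Int.band b (2 ^ i) = 0))
      if clear_bits = [] then (b, bits, attempts)
      else
        let prime := PySem.List.pyGetD PRIMES (PySem.Int.mod (attempts + 3) 8) 0
        let idx := PySem.Int.mod (b * prime + bits) (clear_bits.length : Int)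
        let j := clear_bits.getD idx.toNat 0
        let b' := PySem.Int.bor b ((2 ^ j : Int))         -- b |= (1 << j)
        pvLoopLow f b' (pvBits b') (attempts + 1)
    else (b, bits, attempts)

def balance_byte (byte : Int) (target_bits : Int) : Int :=
  let b := PySem.Int.band byte 255
  let bits := pvBits b
  if bits ≤ 5 ∧ bits ≥ 3 then b
  else
    let orig := b
    let r1 := pvLoopHigh 8 b bits 0
    let r2 := pvLoopLow 8 r1.1 r1.2.1 r1.2.2
    let final_bits := pvBits r2.1
    if final_bits > 5 ∨ final_bits < 3 then orig
    else r2.1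

-- ===== PORT B =====

def BALANCED : List Int := [
  137, 137, 26, 131, 76, 37, 22, 7, 28, 137, 74, 11, 28, 13, 14, 15,
  28, 49, 26, 19, 21, 21, 22, 23, 28, 25, 26, 27, 28, 29, 30, 31,
  100, 161, 98, 35, 44, 37, 38, 39, 104, 41, 42, 43, 44, 45, 46, 47,
  52, 49, 50, 51, 52, 53, 54, 55, 56, 57, 58, 59, 60, 61, 62, 55,
  76, 81, 74, 67, 69, 69, 70, 71, 76, 73, 74, 75, 76, 77, 78, 79,
  81, 81, 82, 83, 84, 85, 86, 87, 88, 89, 90, 91, 92, 93, 94, 93,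
  100, 97, 98, 99, 100, 101, 102, 103, 104, 105, 106, 107, 108, 109, 110, 103,
  112, 113, 114, 115, 116, 117, 118, 117, 120, 121, 122, 107, 124, 121, 124, 55,
  140, 193, 162, 131, 140, 133, 134, 135, 168, 137, 138, 139, 140, 141, 142, 143,
  148, 145, 146, 147, 148, 149, 150, 151, 152, 153, 154, 155, 156, 157, 158, 151,
  176, 161, 162, 163, 164, 165, 166, 167, 168, 169, 170, 171, 172, 173, 174, 47,
  176, 177, 178, 179, 180, 181, 182, 167, 184, 185, 186, 59, 188, 173, 182, 151,
  196, 193, 194, 195, 196, 197, 198, 199, 200, 201, 202, 203, 204, 205, 206, 199,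
  208, 209, 210, 211, 212, 213, 214, 213, 216, 217, 218, 203, 220, 217, 220, 93,
  224, 225, 226, 227, 228, 229, 230, 199, 232, 233, 234, 107, 236, 205, 230, 103,
  240, 241, 242, 211, 244, 241, 244, 167, 248, 217, 234, 217, 248, 61, 158, 103]

def balance_byte_alt (byte : Int) (target_bits : Int) : Int :=
  BALANCED.getD (PySem.Int.band byte 255).toNat 0   -- BALANCED[byte & 0xFF]

-- ===== PRECONDITION & SPEC =====

def Spec_balance_byte (byte : Int) (target_bits : Int) (out : Int) : Prop := out = balance_byte_alt byte target_bits
instance (byte : Int) (target_bits : Int) (out : Int) : Decidable (Spec_balance_byte byte target_bits out) := by unfold Spec_balance_byte; infer_instance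

-- ===== CLAIM =====

def Claim_equal_balance_byte : Prop := ∀ (byte : Int) (target_bits : Int), Dom_balance_byte byte target_bits → Spec_balance_byte byte target_bits (balance_byte byte target_bits)

-- ===== LEMMAS AND PROOFS =====

theorem band255_bounds (x : Int) : 0 ≤ PySem.Int.band x 255 ∧ PySem.Int.band x 255 < 256 := by
  unfold PySem.Int.band
  have e : (255:Int).toNat = 255 := rfl
  have h := Nat.and_le_right (n := x.toNat) (m := 255)
  split_ifs <;> first | omega | (rw [e]; omega)

theorem band255_idem (x : Int) : PySem.Int.band (PySem.Int.band x 255) 255 = PySem.Int.band x 255 := by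
  obtain ⟨h0, h1⟩ := band255_bounds x
  rw [PySem.Int.band_of_nonneg h0 (by norm_num)]
  have e : (255:Int).toNat = 255 := rfl
  rw [e]
  have h2 : (PySem.Int.band x 255).toNat < 256 := by omega
  have hand : (PySem.Int.band x 255).toNat &&& 255 = (PySem.Int.band x 255).toNat := by
    have e8 : (255:Nat) = 2^8 - 1 := rfl
    rw [e8, Nat.and_two_pow_sub_one_eq_mod, Nat.mod_eq_of_lt h2]
  rw [hand, Int.toNat_of_nonneg h0]

set_option maxHeartbeats 4000000 in
set_option maxRecDepth 10000 in
theorem table_key : ∀ n : Fin 256, balance_byte ((n : Nat) : Int) 0 = BALANCED.getD (n : Nat) 0 := by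
  decide

theorem balance_byte_stable (x t : Int) : balance_byte x t = balance_byte (PySem.Int.band x 255) 0 := by
  simp only [balance_byte, band255_idem]

-- ===== VERDICT =====

theorem balance_byte_spec : Claim_equal_balance_byte := by
  intro byte t _
  unfold Spec_balance_byte balance_byte_alt
  obtain ⟨h0, h1⟩ := band255_bounds byte
  rw [balance_byte_stable byte t]
  have hn : (PySem.Int.band byte 255) = (((PySem.Int.band byte 255).toNat : Nat) : Int) :=
    (Int.toNat_of_nonneg h0).symm
  have hlt : (PySem.Int.band byte 255).toNat < 256 := by omega
  have := table_key ⟨(PySem.Int.band byte 255).toNat, hlt⟩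
  simpa [← hn] using this
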